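-- pv_equiv track=rewrite | github.com/tmncollins/BIO-Solutions | 2022/2022 Q3 - Parking.py | get_num_prefs
-- ===== SOURCE A (Python) =====
-- def get_num_prefs(parked, car):
--     position = parked.index(car)
--     preferences = 1
--
--     while position > 0:
--         position -= 1
--         if parked[position] == ".":
--             break
--         preferences += 1
--
--     return preferences
-- ===== SOURCE B (Python) =====
-- def get_num_prefs(parked, car):
--     position = parked.index(car)
--     left = parked[:position]
--     if "." in left:
--         d = len(left) - 1 - left[::-1].index(".")
--     else:
--         d = -1
--     return position - d
-- ===== Notes on version B (the rewrite author's own statement) =====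
-- stated objective: simpler
-- what changed: Replaces the explicit backward counting while-loop with a boundary computation: find the nearest '.' left of the car's position via a slice and a reverse index lookup, and return the distance position - d.
import Mathlib
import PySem

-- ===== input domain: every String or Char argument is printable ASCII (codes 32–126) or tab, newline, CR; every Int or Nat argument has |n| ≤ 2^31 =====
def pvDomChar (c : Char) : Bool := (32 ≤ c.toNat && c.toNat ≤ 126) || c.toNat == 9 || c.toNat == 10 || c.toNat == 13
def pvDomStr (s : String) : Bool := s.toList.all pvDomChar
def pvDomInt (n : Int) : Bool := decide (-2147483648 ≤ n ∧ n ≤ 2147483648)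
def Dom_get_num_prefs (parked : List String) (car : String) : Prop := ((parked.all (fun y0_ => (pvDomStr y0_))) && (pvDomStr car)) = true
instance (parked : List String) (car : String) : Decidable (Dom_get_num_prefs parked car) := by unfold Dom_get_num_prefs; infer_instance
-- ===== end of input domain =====

-- B replaces A's backward counting loop with a slice plus nearest-'.'-boundary lookup; objective: simpler.
-- ===== PORT A =====
-- the while-loop of A: recursion on `position`, same state (position, preferences)
def pvALoop (parked : List String) : Nat → Int → Int
  | 0, preferences => preferences
  | p + 1, preferences =>
    if parked.getD p "" = "." then preferences else pvALoop parked p (preferences + 1)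

def get_num_prefs (parked : List String) (car : String) : Int :=
  match PySem.List.index? parked car with
  | none => 0          -- unreachable under Pre_: Python raises ValueError here
  | some position => pvALoop parked position 1

-- ===== PORT B =====
def get_num_prefs_alt (parked : List String) (car : String) : Int :=
  match PySem.List.index? parked car with
  | none => 0          -- unreachable under Pre_: Python raises ValueError here
  | some position =>
    let left := parked.take position
    let d : Int :=
      if "." ∈ left then
        (left.length : Int) - 1 - (PySem.List.index? left.reverse ".").getD 0
      else -1
    (position : Int) - d

-- ===== PRECONDITION & SPEC =====
-- Pre_ excludes exactly the inputs where `parked.index(car)` raises ValueError (car not in parked).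
def Pre_get_num_prefs (parked : List String) (car : String) : Prop := car ∈ parked
instance (parked : List String) (car : String) : Decidable (Pre_get_num_prefs parked car) := by unfold Pre_get_num_prefs; infer_instance
def pvWitness_get_num_prefs : List String × String := (["a", ".", "b", "c"], "c")
def Spec_get_num_prefs (parked : List String) (car : String) (out : Int) : Prop := out = get_num_prefs_alt parked car
instance (parked : List String) (car : String) (out : Int) : Decidable (Spec_get_num_prefs parked car out) := by unfold Spec_get_num_prefs; infer_instance

-- ===== CLAIM (what is proved, stated in full; the proofs are below) =====
def Claim_equal_get_num_prefs : Prop := ∀ (parked : List String) (car : String), Dom_get_num_prefs parked car → Pre_get_num_prefs parked car → Spec_get_num_prefs parked car (get_num_prefs parked car)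

-- ===== LEMMAS AND PROOFS =====

-- B's value for a given position, as a function of the list and the position
def pvBval (parked : List String) (position : Nat) : Int :=
  let left := parked.take position
  let d : Int :=
    if "." ∈ left then
      (left.length : Int) - 1 - (PySem.List.index? left.reverse ".").getD 0
    else -1
  (position : Int) - d

theorem pvALoop_succ_prefs (parked : List String) (p : Nat) (x : Int) :
    pvALoop parked p (x + 1) = pvALoop parked p x + 1 := by
  induction p generalizing x with
  | zero => simp [pvALoop]
  | succ p ih =>
    simp only [pvALoop]
    split <;> simp [ih]

theorem pvALoop_eq_pvBval (parked : List String) (position : Nat)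
    (hpos : position ≤ parked.length) :
    pvALoop parked position 1 = pvBval parked position := by
  induction position with
  | zero => simp [pvALoop, pvBval]
  | succ p ih =>
    have hp : p < parked.length := hpos
    have htake : parked.take (p + 1) = parked.take p ++ [parked[p]] :=
      List.take_succ_eq_append_getElem hp
    have hlen : (parked.take p).length = p := List.length_take_of_le (le_of_lt hp)
    have hget : parked.getD p "" = parked[p] := List.getD_eq_getElem parked "" hp
    have ihv := ih (le_of_lt hp)
    simp only [pvALoop, pvBval] at ihv ⊢
    rw [htake, hget]
    by_cases hdot : parked[p] = "."
    · rw [if_pos hdot]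
      simp [hdot, List.reverse_append, hlen]
    · rw [if_neg hdot, pvALoop_succ_prefs, ihv]
      have hrev : (parked.take p ++ [parked[p]]).reverse
          = parked[p] :: (parked.take p).reverse := by simp
      by_cases hmem : "." ∈ parked.take p
      · obtain ⟨j, hj⟩ := Option.isSome_iff_exists.mp
          ((PySem.List.index?_isSome_iff ((parked.take p).reverse) ".").mpr
            (List.mem_reverse.mpr hmem))
        have hmem' : "." ∈ parked.take p ++ [parked[p]] :=
          List.mem_append_left [parked[p]] hmem
        rw [if_pos hmem, if_pos hmem', hrev,
          PySem.List.index?_cons_of_ne _ hdot, hj]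
        simp [hlen]
        omega
      · have hnl : "." ∉ parked.take p ++ [parked[p]] := by
          simp only [List.mem_append, List.mem_singleton]
          rintro (h | h)
          · exact hmem h
          · exact hdot h.symm
        rw [if_neg hmem, if_neg hnl]
        omega

-- ===== VERDICT (by name: the statement is the Claim_ definition above) =====
theorem get_num_prefs_spec : Claim_equal_get_num_prefs := by
  intro parked car _ hpre
  unfold Spec_get_num_prefs get_num_prefs get_num_prefs_alt
  have hmem : car ∈ parked := hpre
  obtain ⟨k, hk⟩ := Option.isSome_iff_exists.mp
    ((PySem.List.index?_isSome_iff parked car).mpr hmem)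
  obtain ⟨hklt, -, -⟩ := PySem.List.getElem_of_index?_eq_some hk
  rw [hk]
  exact pvALoop_eq_pvBval parked k (le_of_lt hklt)
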